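-- pv_equiv track=rewrite | github.com/pypi-data/pypi-mirror-400 | packages/circuit_synth/circuit_synth-0.12.1-py3-none-any.whl/circuit_synth/design_for_manufacturing/json_dfm_analyzer.py | _analyze_technology_mix
-- ===== SOURCE A (Python) =====
-- from typing import Any, Dict, List, Optional, Tuple
--
-- def _analyze_technology_mix(components: Dict[str, Any]) -> Dict[str, int]:
--     """Analyze SMT vs THT technology mix"""
--     smt_count = 0
--     tht_count = 0
--     mixed_count = 0
--
--     for comp in components.values():
--         footprint = comp.get("footprint", "").lower()
--
--         # SMT indicators
--         if any(
--             x in footprint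
--             for x in [
--                 "smd",
--                 "0402",
--                 "0603",
--                 "0805",
--                 "1206",
--                 "soic",
--                 "qfp",
--                 "qfn",
--                 "bga",
--             ]
--         ):
--             smt_count += 1
--         # THT indicators
--         elif any(
--             x in footprint for x in ["tht", "through", "dip", "radial", "axial"]
--         ):
--             tht_count += 1
--         # Default to SMT for unknown
--         else:
--             smt_count += 1
--
--     return {"SMT": smt_count, "THT": tht_count}
-- ===== SOURCE B (Python) =====
-- _SMT_KEYS = ["smd", "0402", "0603", "0805", "1206", "soic", "qfp", "qfn", "bga"]
-- _THT_KEYS = ["tht", "through", "dip", "radial", "axial"]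
--
--
-- def _classify(footprint):
--     for k in _SMT_KEYS:
--         if k in footprint:
--             return "SMT"
--     for k in _THT_KEYS:
--         if k in footprint:
--             return "THT"
--     return "SMT"
--
--
-- def _analyze_technology_mix(components):
--     # Stage 1: frequency table of distinct (lowercased) footprints.
--     freq = {}
--     for comp in components.values():
--         fp = comp.get("footprint", "").lower()
--         freq[fp] = freq.get(fp, 0) + 1
--     # Stage 2: classify each DISTINCT footprint once, aggregate multiplicities.
--     counts = {"SMT": 0, "THT": 0}
--     for fp, n in freq.items():
--         counts[_classify(fp)] += n
--     return counts
-- ===== Notes on version B (the rewrite author's own statement) =====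
-- stated objective: faster
-- what changed: B replaces A's single pass with two if/elif/else counters by a two-stage grouping algorithm: it first builds a frequency dict of distinct lowercased footprints, then classifies each DISTINCT footprint exactly once (first-matching-keyword scan) and aggregates the multiplicities into the result dict.
import Mathlib
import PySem

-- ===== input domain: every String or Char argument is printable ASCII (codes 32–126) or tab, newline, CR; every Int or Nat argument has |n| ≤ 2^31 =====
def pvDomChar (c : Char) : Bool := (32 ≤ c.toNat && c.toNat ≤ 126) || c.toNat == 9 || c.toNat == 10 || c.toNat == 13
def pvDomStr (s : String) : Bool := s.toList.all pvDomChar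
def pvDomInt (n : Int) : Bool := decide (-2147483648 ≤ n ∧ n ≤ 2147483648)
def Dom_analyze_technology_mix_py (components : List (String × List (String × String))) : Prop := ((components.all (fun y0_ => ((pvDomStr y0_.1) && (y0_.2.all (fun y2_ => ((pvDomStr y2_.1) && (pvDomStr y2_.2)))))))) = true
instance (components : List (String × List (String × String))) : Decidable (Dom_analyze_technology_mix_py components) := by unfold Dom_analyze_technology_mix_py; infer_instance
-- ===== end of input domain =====

-- B groups components by distinct lowercased footprint first (frequency dict), classifies each
-- distinct footprint once, and aggregates multiplicities, instead of A's single pass with two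
-- counters in an if/elif/else (objective: alternative).

-- ===== PORT A =====
def pvSmtKeys : List String := ["smd", "0402", "0603", "0805", "1206", "soic", "qfp", "qfn", "bga"]

def pvThtKeys : List String := ["tht", "through", "dip", "radial", "axial"]

-- the body of A's for-loop: acc = (smt_count, tht_count)
def pvStepA (acc : Int × Int) (comp : String × List (String × String)) : Int × Int :=
  let footprint := PySem.Str.lower ((PySem.Dict.mk comp.2).getD "footprint" "")
  if pvSmtKeys.any (fun k => PySem.Str.isIn k footprint) then (acc.1 + 1, acc.2)
  else if pvThtKeys.any (fun k => PySem.Str.isIn k footprint) then (acc.1, acc.2 + 1)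
  else (acc.1 + 1, acc.2)

def analyze_technology_mix_py (components : List (String × List (String × String))) : List (String × Int) :=
  let st := components.foldl pvStepA (0, 0)
  [("SMT", st.1), ("THT", st.2)]

-- ===== PORT B =====
-- _classify: first SMT keyword scan, then THT keyword scan, default "SMT"
def pvClassify (footprint : String) : String :=
  if pvSmtKeys.any (fun k => PySem.Str.isIn k footprint) then "SMT"
  else if pvThtKeys.any (fun k => PySem.Str.isIn k footprint) then "THT"
  else "SMT"

def pvFootprint (comp : String × List (String × String)) : String :=
  PySem.Str.lower ((PySem.Dict.mk comp.2).getD "footprint" "")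

def analyze_technology_mix_py_alt (components : List (String × List (String × String))) : List (String × Int) :=
  -- Stage 1: freq[fp] = freq.get(fp, 0) + 1
  let freq := components.foldl
    (fun d c => d.insert (pvFootprint c) ((d.getD (pvFootprint c) 0) + 1))
    (PySem.Dict.empty : PySem.Dict String Int)
  -- Stage 2: counts[_classify(fp)] += n over freq.items()
  let counts := freq.items.foldl
    (fun d p => d.insert (pvClassify p.1) (d.getD (pvClassify p.1) 0 + p.2))
    (PySem.Dict.mk [("SMT", (0 : Int)), ("THT", (0 : Int))])
  counts.items

-- ===== PRECONDITION & SPEC =====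
def Spec_analyze_technology_mix_py (components : List (String × List (String × String))) (out : List (String × Int)) : Prop := out = analyze_technology_mix_py_alt components
instance (components : List (String × List (String × String))) (out : List (String × Int)) : Decidable (Spec_analyze_technology_mix_py components out) := by unfold Spec_analyze_technology_mix_py; infer_instance

-- ===== CLAIM (what is proved, stated in full; the proofs are below) =====
def Claim_equal_analyze_technology_mix_py : Prop := ∀ (components : List (String × List (String × String))), Dom_analyze_technology_mix_py components → Spec_analyze_technology_mix_py components (analyze_technology_mix_py components)

-- ===== LEMMAS AND PROOFS =====

-- whether _classify answers "THT"
def pvIsTht (fp : String) : Bool :=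
  pvThtKeys.any (fun k => PySem.Str.isIn k fp) && !(pvSmtKeys.any (fun k => PySem.Str.isIn k fp))

lemma pvClassify_eq (fp : String) :
    pvClassify fp = if pvIsTht fp then "THT" else "SMT" := by
  unfold pvClassify pvIsTht
  cases hS : pvSmtKeys.any (fun k => PySem.Str.isIn k fp) <;>
    cases hT : pvThtKeys.any (fun k => PySem.Str.isIn k fp) <;>
      simp only [Bool.and_true, Bool.and_false, Bool.not_true, Bool.not_false,
        if_true, if_false, Bool.false_eq_true]

-- A's loop body in terms of pvIsTht
lemma pvStepA_eq (acc : Int × Int) (comp : String × List (String × String)) :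
    pvStepA acc comp =
      if pvIsTht (pvFootprint comp) then (acc.1, acc.2 + 1) else (acc.1 + 1, acc.2) := by
  unfold pvStepA pvIsTht pvFootprint
  cases hS : pvSmtKeys.any (fun k => PySem.Str.isIn k (PySem.Str.lower ((PySem.Dict.mk comp.2).getD "footprint" ""))) <;>
    cases hT : pvThtKeys.any (fun k => PySem.Str.isIn k (PySem.Str.lower ((PySem.Dict.mk comp.2).getD "footprint" ""))) <;>
      simp only [hS, hT, Bool.and_true, Bool.and_false, Bool.not_true, Bool.not_false,
        if_true, if_false, Bool.false_eq_true]

-- invariant of A's fold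
lemma foldA_eq (l : List (String × List (String × String))) (s t : Int) :
    l.foldl pvStepA (s, t)
    = (s + ((l.countP (fun c => !pvIsTht (pvFootprint c)) : Nat) : Int),
       t + ((l.countP (fun c => pvIsTht (pvFootprint c)) : Nat) : Int)) := by
  induction l generalizing s t with
  | nil => simp
  | cons hd tl ih =>
    simp only [List.foldl_cons, List.countP_cons, pvStepA_eq]
    by_cases h : pvIsTht (pvFootprint hd) = true
    · simp only [h, if_true, ih]; simp; ring
    · simp only [h, ih]; simp; ring

-- sums of the THT / non-THT multiplicities of a pair list
def pvSumTht (ps : List (String × Int)) : Int :=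
  ((ps.filter (fun p => pvIsTht p.1)).map (·.2)).sum
def pvSumSmt (ps : List (String × Int)) : Int :=
  ((ps.filter (fun p => !pvIsTht p.1)).map (·.2)).sum

-- invariant of B's second fold
lemma fold2_eq (ps : List (String × Int)) (s t : Int) :
    ps.foldl
      (fun d p => d.insert (pvClassify p.1) (d.getD (pvClassify p.1) 0 + p.2))
      (PySem.Dict.mk [("SMT", s), ("THT", t)])
    = PySem.Dict.mk [("SMT", s + pvSumSmt ps), ("THT", t + pvSumTht ps)] := by
  induction ps generalizing s t with
  | nil => simp [pvSumSmt, pvSumTht]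
  | cons hd tl ih =>
    simp only [List.foldl_cons]
    rw [pvClassify_eq hd.1]
    by_cases h : pvIsTht hd.1 = true
    · have : (PySem.Dict.mk [("SMT", s), ("THT", t)]).insert "THT"
          ((PySem.Dict.mk [("SMT", s), ("THT", t)]).getD "THT" 0 + hd.2)
          = PySem.Dict.mk [("SMT", s), ("THT", t + hd.2)] := by rfl
      simp only [h, if_true, this, ih]
      simp [pvSumSmt, pvSumTht, h]; ring
    · have : (PySem.Dict.mk [("SMT", s), ("THT", t)]).insert "SMT"
          ((PySem.Dict.mk [("SMT", s), ("THT", t)]).getD "SMT" 0 + hd.2)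
          = PySem.Dict.mk [("SMT", s + hd.2), ("THT", t)] := by rfl
      simp only [h, if_false, Bool.false_eq_true, this, ih]
      simp [pvSumSmt, pvSumTht, h]; ring

-- summing multiplicities over any duplicate-free key list with the members of l = countP over l
lemma sum_count_nodup (p : String → Bool) (ks : List String) :
    ∀ l : List String, ks.Nodup → (∀ x, x ∈ ks ↔ x ∈ l) →
    ((ks.filter p).map (fun k => l.count k)).sum = l.countP p := by
  induction ks with
  | nil =>
    intro l _ hm
    have hl : l = [] := List.eq_nil_iff_forall_not_mem.mpr
      (fun x hx => by simpa using (hm x).mpr hx)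
    subst hl; simp
  | cons k ks ih =>
    intro l hnd hm
    have hk : k ∉ ks := (List.nodup_cons.mp hnd).1
    have hnd' : ks.Nodup := (List.nodup_cons.mp hnd).2
    have hm' : ∀ x, x ∈ ks ↔ x ∈ l.filter (fun x => !(x == k)) := by
      intro x; constructor
      · intro hx
        have hxl : x ∈ l := (hm x).mp (List.mem_cons_of_mem _ hx)
        have hxk : x ≠ k := fun h => hk (h ▸ hx)
        simp [List.mem_filter, hxl, hxk]
      · intro hx
        rcases List.mem_filter.mp hx with ⟨hxl, hne⟩
        rcases List.mem_cons.mp ((hm x).mpr hxl) with h | h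
        · subst h; simp at hne
        · exact h
    have hcnt : ∀ k' ∈ ks, l.count k' = (l.filter (fun x => !(x == k))).count k' := by
      intro k' hk'
      have hne : k' ≠ k := fun h => hk (h ▸ hk')
      simp only [List.count_eq_countP, List.countP_filter]
      refine (List.countP_congr (fun x _ => ?_)).symm
      by_cases hx : x = k' <;> simp [hx, hne]
    have hsplit : l.countP p
        = (l.filter (fun x => x == k)).countP p + (l.filter (fun x => !(x == k))).countP p :=
      List.countP_eq_countP_filter_add l p (fun x => x == k)
    have hfirst : (l.filter (fun x => x == k)).countP p = if p k then l.count k else 0 := by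
      by_cases hp : p k
      · have he : (l.filter (fun x => x == k)).countP p
            = (l.filter (fun x => x == k)).countP (fun _ => true) := by
          refine List.countP_congr (fun x hx => ?_)
          have : x = k := by simpa using (List.mem_filter.mp hx).2
          simp [this, hp]
        simp [he, hp, List.countP_true, List.count_eq_length_filter]
      · have he : (l.filter (fun x => x == k)).countP p
            = (l.filter (fun x => x == k)).countP (fun _ => false) := by
          refine List.countP_congr (fun x hx => ?_)
          have : x = k := by simpa using (List.mem_filter.mp hx).2
          simp [this, hp]
        simp [he, hp]
    have hih := ih (l.filter (fun x => !(x == k))) hnd' hm'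
    have hmap : (ks.filter p).map (fun k' => l.count k')
        = (ks.filter p).map (fun k' => (l.filter (fun x => !(x == k))).count k') :=
      List.map_congr_left (fun a ha => hcnt a (List.mem_of_mem_filter ha))
    by_cases hp : p k
    · simp only [List.filter_cons, hp, if_true, List.map_cons, List.sum_cons, hmap, hih,
        hsplit, hfirst]
    · simp only [List.filter_cons, hp, if_false, Bool.false_eq_true, hmap, hih,
        hsplit, hfirst]
      simp

-- ===== VERDICT (by name: the statement is the Claim_ definition above) =====
theorem analyze_technology_mix_py_spec : Claim_equal_analyze_technology_mix_py := by
  intro components _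
  unfold Spec_analyze_technology_mix_py analyze_technology_mix_py analyze_technology_mix_py_alt
  have hfreq : components.foldl
      (fun d c => d.insert (pvFootprint c) ((d.getD (pvFootprint c) 0) + 1))
      (PySem.Dict.empty : PySem.Dict String Int)
      = PySem.Dict.counter (components.map pvFootprint) := by
    rw [← List.foldl_map (f := pvFootprint)
      (g := fun (d : PySem.Dict String Int) x => d.insert x ((d.getD x 0) + 1)),
      PySem.Dict.foldl_insert_getD_add_one_eq_counter]
  simp only [foldA_eq, hfreq, PySem.Dict.items_counter, fold2_eq]
  set fps := components.map pvFootprint with hfps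
  have hsum : ∀ p : String → Bool,
      ((((PySem.Set.ofList fps).map (fun k => (k, (fps.count k : Int)))).filter
          (fun q => p q.1)).map (fun q => q.2)).sum
        = ((fps.countP p : Nat) : Int) := by
    intro p
    rw [List.filter_map, List.map_map]
    have h1 : ((fun (q : String × Int) => q.2) ∘ fun k => (k, (fps.count k : Int)))
        = fun k => ((fps.count k : Nat) : Int) := rfl
    have h2 : ((PySem.Set.ofList fps).filter ((fun q : String × Int => p q.1) ∘
          fun k => (k, (fps.count k : Int))))
        = (PySem.Set.ofList fps).filter p := rfl
    rw [h1, h2]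
    have h3 := sum_count_nodup p (PySem.Set.ofList fps) fps
      (PySem.Set.nodup_ofList fps) (fun x => PySem.Set.mem_ofList fps x)
    rw [← h3, Nat.cast_list_sum, List.map_map]
    rfl
  have hcm : ∀ p : String → Bool,
      components.countP (fun c => p (pvFootprint c)) = fps.countP p := by
    intro p; rw [hfps, List.countP_map]; rfl
  have hS := hsum (fun k => !pvIsTht k)
  have hT := hsum pvIsTht
  have hcmS := hcm (fun k => !pvIsTht k)
  have hcmT := hcm pvIsTht
  simp only [pvSumSmt, pvSumTht]
  simp [hS, hT, hcmS, hcmT]
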